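-- pv_equiv track=rewrite | github.com/xJakubi/Rubygrindbot | command_maprotationembed.py | detect_pattern_with_confidence
-- ===== SOURCE A (Python) =====
-- def detect_pattern_with_confidence(sequence):
--     """Detect repeating pattern in the sequence and count occurrences"""
--     if not sequence or len(sequence) < 4:
--         return None, 0
--
--     best_pattern = None
--     most_occurrences = 0
--
--     # Try patterns of different lengths
--     for pattern_length in range(2, min(9, len(sequence) // 2 + 1)):
--         # Look for patterns that repeat multiple times
--         for start in range(len(sequence) - pattern_length * 2 + 1):
--             candidate = sequence[start:start + pattern_length]
--
--             # Count occurrences of this pattern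
--             occurrences = 0
--             for i in range(0, len(sequence) - pattern_length + 1):
--                 if sequence[i:i + pattern_length] == candidate:
--                     occurrences += 1
--
--             # Check if this is a good pattern
--             if occurrences >= 2:
--                 # Prioritize longer patterns or patterns with more occurrences
--                 if (not best_pattern or
--                     len(candidate) > len(best_pattern) or
--                     (len(candidate) == len(best_pattern) and occurrences > most_occurrences)):
--                     best_pattern = candidate
--                     most_occurrences = occurrences
--
--     # If we found a good pattern, return it
--     if best_pattern and most_occurrences >= 2:
--         return best_pattern, most_occurrences
--
--     # As a fallback, check for strict repeating patterns
--     for pattern_length in range(2, min(9, len(sequence) // 2 + 1)):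
--         base_pattern = sequence[:pattern_length]
--         repeats = 0
--
--         # Count how many full repeats we find
--         for i in range(0, len(sequence) - pattern_length + 1, pattern_length):
--             if sequence[i:i+pattern_length] == base_pattern:
--                 repeats += 1
--             else:
--                 break
--
--         if repeats >= 2:
--             return base_pattern, repeats
--
--     return None, 0
-- ===== SOURCE B (Python) =====
-- def detect_pattern_with_confidence(sequence):
--     """Detect repeating pattern in the sequence and count occurrences.
--
--     One counting dict per window length, lengths scanned longest-first:
--     the first length with a window (starting early enough for two disjoint
--     copies) occurring >= 2 times wins; within it, the earliest window of
--     maximal occurrence count.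
--     """
--     n = len(sequence)
--     if n < 4:
--         return None, 0
--     for length in range(min(8, n // 2), 1, -1):
--         counts = {}
--         for i in range(n - length + 1):
--             w = tuple(sequence[i:i + length])
--             counts[w] = counts.get(w, 0) + 1
--         best, best_count = None, 0
--         for start in range(n - 2 * length + 1):
--             c = counts[tuple(sequence[start:start + length])]
--             if c >= 2 and c > best_count:
--                 best, best_count = sequence[start:start + length], c
--         if best is not None:
--             return best, best_count
--     return None, 0
-- ===== Notes on version B (the rewrite author's own statement) =====
-- stated objective: faster
-- what changed: Instead of rescanning the whole sequence for every candidate window (and a dead strict-prefix fallback), B builds one occurrence-counting dict per window length and scans the lengths longest-first, returning at the first length that has a window (starting early enough for two disjoint copies) occurring at least twice.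
import Mathlib
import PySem

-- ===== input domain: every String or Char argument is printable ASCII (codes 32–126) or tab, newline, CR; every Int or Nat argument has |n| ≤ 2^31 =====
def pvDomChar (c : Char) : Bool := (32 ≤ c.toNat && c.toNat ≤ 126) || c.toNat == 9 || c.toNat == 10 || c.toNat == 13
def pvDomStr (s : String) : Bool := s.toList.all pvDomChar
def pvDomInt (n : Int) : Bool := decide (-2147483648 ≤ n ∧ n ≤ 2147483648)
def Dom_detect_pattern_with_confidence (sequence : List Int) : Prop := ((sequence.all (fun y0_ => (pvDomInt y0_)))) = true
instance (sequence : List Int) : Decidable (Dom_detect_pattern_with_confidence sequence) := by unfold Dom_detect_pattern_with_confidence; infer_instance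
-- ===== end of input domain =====

-- B replaces A's quadratic per-candidate rescan by one occurrence-counting dict per window
-- length and scans lengths longest-first, returning at the first length with a repeat
-- (A's strict-prefix fallback is unreachable); measured faster at large sizes.

-- ===== PORT A =====
-- inner counting loop: 'occurrences' for one candidate
def pvOccA (sequence : List Int) (n pl : Int) (candidate : List Int) : Int :=
  (PySem.List.pyRange 0 (n - pl + 1) 1).foldl
    (fun occurrences i =>
      if PySem.List.slice sequence (some i) (some (i + pl)) = candidate then occurrences + 1
      else occurrences) 0

-- body of A's 'for start in range(...)' loop
def pvBodyA (sequence : List Int) (n pl : Int) (st2 : Option (List Int) × Int) (start : Int) :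
    Option (List Int) × Int :=
  let candidate := PySem.List.slice sequence (some start) (some (start + pl))
  let occurrences := pvOccA sequence n pl candidate
  if 2 ≤ occurrences then
    match st2 with
    | (none, _) => (some candidate, occurrences)
    | (some bp, most) =>
      if bp = [] ∨ (bp.length : Int) < (candidate.length : Int) ∨
          ((candidate.length : Int) = (bp.length : Int) ∧ most < occurrences) then
        (some candidate, occurrences)
      else (some bp, most)
  else st2

-- one iteration of A's 'for pattern_length in range(...)' loop
def pvStepA (sequence : List Int) (n : Int) (st : Option (List Int) × Int) (pl : Int) :
    Option (List Int) × Int :=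
  (PySem.List.pyRange 0 (n - pl * 2 + 1) 1).foldl (pvBodyA sequence n pl) st

-- body of the fallback's inner loop (with the 'break' as a Boolean flag)
def pvRepBodyA (sequence : List Int) (pl : Int) (base : List Int) (st : Int × Bool) (i : Int) :
    Int × Bool :=
  if st.2 then st
  else if PySem.List.slice sequence (some i) (some (i + pl)) = base then (st.1 + 1, st.2)
  else (st.1, true)

def pvRepeatsA (sequence : List Int) (n pl : Int) (base : List Int) : Int × Bool :=
  (PySem.List.pyRange 0 (n - pl + 1) pl).foldl (pvRepBodyA sequence pl base) (0, false)

-- A's fallback 'for pattern_length in ...' loop with its early returns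
def pvFallbackA (sequence : List Int) (n : Int) : List Int → Option (List Int) × Int
  | [] => (none, 0)
  | pl :: rest =>
    let base := PySem.List.slice sequence (some 0) (some pl)
    let repeats := (pvRepeatsA sequence n pl base).1
    if 2 ≤ repeats then (some base, repeats) else pvFallbackA sequence n rest

def detect_pattern_with_confidence (sequence : List Int) : Option (List Int) × Int :=
  let n : Int := PySem.List.len sequence
  if sequence = [] ∨ n < 4 then (none, 0)
  else
    let lens := PySem.List.pyRange 2 (min 9 (PySem.Int.floordiv n 2 + 1)) 1
    match lens.foldl (pvStepA sequence n) ((none : Option (List Int)), (0 : Int)) with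
    | (some bp, most) =>
      if bp ≠ [] ∧ 2 ≤ most then (some bp, most) else pvFallbackA sequence n lens
    | (none, _) => pvFallbackA sequence n lens

-- ===== PORT B =====
-- counts[w] = counts.get(w, 0) + 1 over all windows of one length
def pvCountsB (sequence : List Int) (n length : Int) : PySem.Dict (List Int) Int :=
  (PySem.List.pyRange 0 (n - length + 1) 1).foldl
    (fun d i =>
      let w := PySem.List.slice sequence (some i) (some (i + length))
      d.insert w (d.getD w 0 + 1)) PySem.Dict.empty

-- body of B's 'for start in range(...)' loop; counts[w] is getD _ 0 — the key is always
-- present (every scanned start is itself a window), so this is exact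
def pvBodyB (sequence : List Int) (length : Int) (counts : PySem.Dict (List Int) Int)
    (st : Option (List Int) × Int) (start : Int) : Option (List Int) × Int :=
  let c := counts.getD (PySem.List.slice sequence (some start) (some (start + length))) 0
  if 2 ≤ c ∧ st.2 < c then
    (some (PySem.List.slice sequence (some start) (some (start + length))), c)
  else st

def pvBestB (sequence : List Int) (n length : Int) (counts : PySem.Dict (List Int) Int) :
    Option (List Int) × Int :=
  (PySem.List.pyRange 0 (n - 2 * length + 1) 1).foldl (pvBodyB sequence length counts) (none, 0)

-- B's 'for length in range(min(8, n // 2), 1, -1)' loop with its early return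
def pvLoopB (sequence : List Int) (n : Int) : List Int → Option (List Int) × Int
  | [] => (none, 0)
  | length :: rest =>
    match pvBestB sequence n length (pvCountsB sequence n length) with
    | (some b, c) => (some b, c)
    | (none, _) => pvLoopB sequence n rest

def detect_pattern_with_confidence_alt (sequence : List Int) : Option (List Int) × Int :=
  let n : Int := PySem.List.len sequence
  if n < 4 then (none, 0)
  else pvLoopB sequence n (PySem.List.pyRange (min 8 (PySem.Int.floordiv n 2)) 1 (-1))

-- ===== PRECONDITION & SPEC =====
def Spec_detect_pattern_with_confidence (sequence : List Int) (out : Option (List Int) × Int) : Prop := out = detect_pattern_with_confidence_alt sequence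
instance (sequence : List Int) (out : Option (List Int) × Int) : Decidable (Spec_detect_pattern_with_confidence sequence out) := by unfold Spec_detect_pattern_with_confidence; infer_instance

-- ===== CLAIM (what is proved, stated in full; the proofs are below) =====
def Claim_equal_detect_pattern_with_confidence : Prop := ∀ (sequence : List Int), Dom_detect_pattern_with_confidence sequence → Spec_detect_pattern_with_confidence sequence (detect_pattern_with_confidence sequence)

-- ===== LEMMAS AND PROOFS =====

-- the window sequence[i : i+L]
def pvWin (sequence : List Int) (L i : Int) : List Int :=
  PySem.List.slice sequence (some i) (some (i + L))

theorem pvWin_length (sequence : List Int) (L i : Int) (h0 : 0 ≤ i)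
    (h1 : i + L ≤ (sequence.length : Int)) (hL : 0 ≤ L) :
    ((pvWin sequence L i).length : Int) = L := by
  unfold pvWin
  rw [PySem.List.slice_toNat sequence h0 (by omega)]
  simp only [List.length_take, List.length_drop]
  omega

theorem pvOccA_eq_countP (sequence : List Int) (n L : Int) (w : List Int) :
    pvOccA sequence n L w =
      ((PySem.List.pyRange 0 (n - L + 1) 1).countP (fun i => decide (pvWin sequence L i = w)) : Int) := by
  unfold pvOccA
  rw [PySem.List.foldl_ite_add_one (fun i => PySem.List.slice sequence (some i) (some (i + L)) = w)]
  simp only [pvWin, zero_add]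
  congr 1

theorem pvCounts_getD (sequence : List Int) (n L : Int) (w : List Int) :
    (pvCountsB sequence n L).getD w 0 = pvOccA sequence n L w := by
  unfold pvCountsB
  rw [show (fun (d : PySem.Dict (List Int) Int) (i : Int) =>
        let wi := PySem.List.slice sequence (some i) (some (i + L))
        d.insert wi (d.getD wi 0 + 1)) =
      (fun (d : PySem.Dict (List Int) Int) (i : Int) =>
        (fun (d : PySem.Dict (List Int) Int) (x : List Int) => d.insert x (d.getD x 0 + 1)) d
          (pvWin sequence L i)) from rfl]
  rw [← List.foldl_map (f := pvWin sequence L)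
      (g := fun (d : PySem.Dict (List Int) Int) (x : List Int) => d.insert x (d.getD x 0 + 1))]
  rw [PySem.Dict.foldl_insert_getD_add_one_eq_counter, PySem.Dict.getD_counter]
  rw [pvOccA_eq_countP]
  norm_cast
  rw [List.count, List.countP_map]
  apply List.countP_congr
  intro x _
  simp [Function.comp]

-- invariant of the per-length scan: nothing yet, or a stored pattern of this length with count ≥ 2
def pvInv (L : Int) (st : Option (List Int) × Int) : Prop :=
  st = (none, 0) ∨ ∃ w m, st = (some w, m) ∧ (w.length : Int) = L ∧ 2 ≤ m

theorem pvBody_eq (sequence : List Int) (n L : Int) (hn : n = (sequence.length : Int))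
    (hL : 2 ≤ L) (s : Int) (hs0 : 0 ≤ s) (hs : s + 2 * L ≤ n)
    (st : Option (List Int) × Int) (hst : pvInv L st) :
    pvBodyA sequence n L st s = pvBodyB sequence L (pvCountsB sequence n L) st s ∧
      pvInv L (pvBodyA sequence n L st s) := by
  have hcl : ((PySem.List.slice sequence (some s) (some (s + L))).length : Int) = L :=
    pvWin_length sequence L s hs0 (by omega) (by omega)
  have hocc := pvCounts_getD sequence n L (PySem.List.slice sequence (some s) (some (s + L)))
  unfold pvBodyA pvBodyB
  simp only [hocc]
  rcases hst with h | ⟨w, m, h, hwl, hm⟩ <;> subst h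
  · by_cases h2 : 2 ≤ pvOccA sequence n L (PySem.List.slice sequence (some s) (some (s + L)))
    · rw [if_pos h2, if_pos ⟨h2, by omega⟩]
      exact ⟨rfl, Or.inr ⟨_, _, rfl, hcl, h2⟩⟩
    · rw [if_neg h2, if_neg (by tauto)]
      exact ⟨rfl, Or.inl rfl⟩
  · have hwne : ¬ w = [] := by
      intro he; subst he; simp at hwl; omega
    by_cases h2 : 2 ≤ pvOccA sequence n L (PySem.List.slice sequence (some s) (some (s + L)))
    · rw [if_pos h2]
      dsimp only
      by_cases hlt : m < pvOccA sequence n L (PySem.List.slice sequence (some s) (some (s + L)))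
      · rw [if_pos (Or.inr (Or.inr ⟨by omega, hlt⟩)), if_pos ⟨h2, hlt⟩]
        exact ⟨rfl, Or.inr ⟨_, _, rfl, hcl, h2⟩⟩
      · rw [if_neg (by push Not; exact ⟨hwne, by omega, fun _ => by omega⟩), if_neg (by tauto)]
        exact ⟨rfl, Or.inr ⟨_, _, rfl, hwl, hm⟩⟩
    · rw [if_neg h2, if_neg (by tauto)]
      exact ⟨rfl, Or.inr ⟨_, _, rfl, hwl, hm⟩⟩

theorem pvFold_eq (sequence : List Int) (n L : Int) (hn : n = (sequence.length : Int))
    (hL : 2 ≤ L) (ss : List Int) (hss : ∀ s ∈ ss, 0 ≤ s ∧ s + 2 * L ≤ n)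
    (st : Option (List Int) × Int) (hst : pvInv L st) :
    ss.foldl (pvBodyA sequence n L) st = ss.foldl (pvBodyB sequence L (pvCountsB sequence n L)) st ∧
      pvInv L (ss.foldl (pvBodyA sequence n L) st) := by
  induction ss generalizing st with
  | nil => exact ⟨rfl, hst⟩
  | cons s ss ih =>
    obtain ⟨hs0, hs1⟩ := hss s (by simp)
    obtain ⟨he, hinv⟩ := pvBody_eq sequence n L hn hL s hs0 hs1 st hst
    simp only [List.foldl_cons, he]
    rw [← he]
    exact ih (fun x hx => hss x (by simp [hx])) _ hinv

-- once the scan has stored a pattern it never reverts to none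
theorem pvBodyA_some (sequence : List Int) (n L : Int) (w : List Int) (m : Int) (s : Int) :
    ∃ w' m', pvBodyA sequence n L (some w, m) s = (some w', m') := by
  unfold pvBodyA
  dsimp only
  split_ifs <;> exact ⟨_, _, rfl⟩

theorem pvFoldA_some (sequence : List Int) (n L : Int) (ss : List Int)
    (w : List Int) (m : Int) :
    ∃ w' m', ss.foldl (pvBodyA sequence n L) (some w, m) = (some w', m') := by
  induction ss generalizing w m with
  | nil => exact ⟨w, m, rfl⟩
  | cons s ss ih =>
    simp only [List.foldl_cons]
    obtain ⟨w', m', hw⟩ := pvBodyA_some sequence n L w m s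
    rw [hw]
    exact ih w' m'

theorem pvBodyA_of_lt (sequence : List Int) (n L : Int) (st : Option (List Int) × Int) (s : Int)
    (h : ¬ 2 ≤ pvOccA sequence n L (PySem.List.slice sequence (some s) (some (s + L)))) :
    pvBodyA sequence n L st s = st := by
  unfold pvBodyA
  rw [if_neg h]

theorem pvBodyA_none_of_le (sequence : List Int) (n L : Int) (m : Int) (s : Int)
    (h : 2 ≤ pvOccA sequence n L (PySem.List.slice sequence (some s) (some (s + L)))) :
    pvBodyA sequence n L (none, m) s =
      (some (PySem.List.slice sequence (some s) (some (s + L))),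
        pvOccA sequence n L (PySem.List.slice sequence (some s) (some (s + L)))) := by
  unfold pvBodyA
  rw [if_pos h]

-- a scan ending with no pattern found saw no candidate with ≥ 2 occurrences
theorem pvFoldA_none (sequence : List Int) (n L : Int) (ss : List Int)
    (st : Option (List Int) × Int)
    (h : (ss.foldl (pvBodyA sequence n L) st).1 = none) :
    ss.foldl (pvBodyA sequence n L) st = st ∧
      ∀ s ∈ ss, pvOccA sequence n L (PySem.List.slice sequence (some s) (some (s + L))) < 2 := by
  induction ss generalizing st with
  | nil => exact ⟨rfl, by simp⟩
  | cons s ss ih =>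
    obtain ⟨st1, st2⟩ := st
    cases st1 with
    | some w =>
      exfalso
      obtain ⟨w', m', hw⟩ := pvFoldA_some sequence n L (s :: ss) w st2
      rw [hw] at h; simp at h
    | none =>
      by_cases h2 : 2 ≤ pvOccA sequence n L (PySem.List.slice sequence (some s) (some (s + L)))
      · exfalso
        simp only [List.foldl_cons, pvBodyA_none_of_le sequence n L st2 s h2] at h
        obtain ⟨w', m', hw⟩ := pvFoldA_some sequence n L ss _ _
        rw [hw] at h; simp at h
      · simp only [List.foldl_cons, pvBodyA_of_lt sequence n L _ s h2] at h ⊢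
        obtain ⟨h1, h3⟩ := ih _ h
        exact ⟨h1, by
          intro x hx
          rcases List.mem_cons.mp hx with hx | hx
          · subst hx; omega
          · exact h3 x hx⟩

-- the per-length scan from an older (shorter) best behaves as from scratch, except that
-- a scan with no hit keeps the older best
theorem pvFromState (sequence : List Int) (n L : Int) (hn : n = (sequence.length : Int))
    (hL : 2 ≤ L) (ss : List Int) (hss : ∀ s ∈ ss, 0 ≤ s ∧ s + 2 * L ≤ n)
    (st₀ : Option (List Int) × Int)
    (h0 : st₀ = (none, 0) ∨ ∃ w m, st₀ = (some w, m) ∧ (w.length : Int) < L) :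
    (ss.foldl (pvBodyA sequence n L) ((none : Option (List Int)), (0 : Int)) = (none, 0) ∧
        ss.foldl (pvBodyA sequence n L) st₀ = st₀) ∨
      ((ss.foldl (pvBodyA sequence n L) ((none : Option (List Int)), (0 : Int))).1 ≠ none ∧
        ss.foldl (pvBodyA sequence n L) st₀ =
          ss.foldl (pvBodyA sequence n L) ((none : Option (List Int)), (0 : Int))) := by
  induction ss with
  | nil =>
    rcases h0 with h | ⟨w, m, h, _⟩ <;> subst h <;> exact Or.inl ⟨rfl, rfl⟩
  | cons s ss ih =>
    obtain ⟨hs0, hs1⟩ := hss s (by simp)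
    have hcl : ((PySem.List.slice sequence (some s) (some (s + L))).length : Int) = L :=
      pvWin_length sequence L s hs0 (by omega) (by omega)
    by_cases h2 : 2 ≤ pvOccA sequence n L (PySem.List.slice sequence (some s) (some (s + L)))
    · have e1 := pvBodyA_none_of_le sequence n L 0 s h2
      have e2 : pvBodyA sequence n L st₀ s =
          (some (PySem.List.slice sequence (some s) (some (s + L))),
            pvOccA sequence n L (PySem.List.slice sequence (some s) (some (s + L)))) := by
        rcases h0 with h | ⟨w, m, h, hwl⟩ <;> subst h
        · exact pvBodyA_none_of_le sequence n L 0 s h2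
        · unfold pvBodyA
          rw [if_pos h2]
          dsimp only
          rw [if_pos (Or.inr (Or.inl (by omega)))]
      simp only [List.foldl_cons, e1, e2]
      refine Or.inr ⟨?_, by trivial⟩
      obtain ⟨w', m', hw⟩ := pvFoldA_some sequence n L ss _ _
      rw [hw]; simp
    · have e1 := pvBodyA_of_lt sequence n L ((none : Option (List Int)), (0 : Int)) s h2
      have e2 := pvBodyA_of_lt sequence n L st₀ s h2
      simp only [List.foldl_cons, e1, e2]
      exact ih (fun x hx => hss x (by simp [hx]))

-- result of the per-length scan started from scratch
def pvResFor (sequence : List Int) (n L : Int) : Option (List Int) × Int :=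
  pvStepA sequence n (none, 0) L

-- what one iteration of A's outer loop does, seen from the outside
def pvLastStep (sequence : List Int) (n : Int) (st : Option (List Int) × Int) (L : Int) :
    Option (List Int) × Int :=
  if (pvResFor sequence n L).1 = none then st else pvResFor sequence n L

theorem pvGoodRange (n L : Int) :
    ∀ s ∈ PySem.List.pyRange 0 (n - L * 2 + 1) 1, 0 ≤ s ∧ s + 2 * L ≤ n := by
  intro s hs
  rw [PySem.List.mem_pyRange_one] at hs
  omega

theorem pvResFor_inv (sequence : List Int) (n L : Int) (hn : n = (sequence.length : Int))
    (hL : 2 ≤ L) : pvInv L (pvResFor sequence n L) := by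
  unfold pvResFor pvStepA
  exact (pvFold_eq sequence n L hn hL _ (pvGoodRange n L) _ (Or.inl rfl)).2

theorem pvChain (sequence : List Int) (n : Int) (hn : n = (sequence.length : Int))
    (ls : List Int) (h2 : ∀ L ∈ ls, 2 ≤ L) (hp : ls.Pairwise (· < ·))
    (st : Option (List Int) × Int)
    (hst : st = (none, 0) ∨ ∃ w m, st = (some w, m) ∧ ∀ L ∈ ls, (w.length : Int) < L) :
    ls.foldl (pvStepA sequence n) st = ls.foldl (pvLastStep sequence n) st := by
  induction ls generalizing st with
  | nil => rfl
  | cons L ls ih =>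
    have hL : 2 ≤ L := h2 L (by simp)
    have hstep : pvStepA sequence n st L = pvLastStep sequence n st L := by
      have h0 : st = (none, 0) ∨ ∃ w m, st = (some w, m) ∧ (w.length : Int) < L := by
        rcases hst with h | ⟨w, m, h, hwl⟩
        · exact Or.inl h
        · exact Or.inr ⟨w, m, h, hwl L (by simp)⟩
      rcases pvFromState sequence n L hn hL _ (pvGoodRange n L) st h0 with
        ⟨hfresh, hkeep⟩ | ⟨hne, heq⟩
      · unfold pvLastStep pvResFor pvStepA
        rw [hkeep, if_pos (by rw [hfresh])]
      · unfold pvLastStep pvResFor pvStepA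
        rw [heq, if_neg hne]
    simp only [List.foldl_cons, hstep]
    apply ih (fun x hx => h2 x (by simp [hx])) (hp.sublist (by simp))
    unfold pvLastStep
    by_cases hres : (pvResFor sequence n L).1 = none
    · rw [if_pos hres]
      rcases hst with h | ⟨w, m, h, hwl⟩
      · exact Or.inl h
      · exact Or.inr ⟨w, m, h, fun x hx => hwl x (by simp [hx])⟩
    · rw [if_neg hres]
      rcases pvResFor_inv sequence n L hn hL with h | ⟨w, m, h, hwl, _⟩
      · rw [h] at hres; simp at hres
      · refine Or.inr ⟨w, m, h, ?_⟩
        intro x hx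
        have := (List.pairwise_cons.mp hp).1 x hx
        omega

-- characterization of the outer fold's result
theorem pvLastFold_cases (sequence : List Int) (n : Int) (ls : List Int) :
    (ls.foldl (pvLastStep sequence n) ((none : Option (List Int)), (0 : Int)) = (none, 0) ∧
        ∀ L ∈ ls, (pvResFor sequence n L).1 = none) ∨
      ∃ L ∈ ls, ls.foldl (pvLastStep sequence n) ((none : Option (List Int)), (0 : Int)) =
          pvResFor sequence n L ∧ (pvResFor sequence n L).1 ≠ none := by
  induction ls using List.reverseRecOn with
  | nil => exact Or.inl ⟨rfl, by simp⟩
  | append_singleton ls L ih =>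
    rw [List.foldl_append]
    simp only [List.foldl_cons, List.foldl_nil]
    by_cases h : (pvResFor sequence n L).1 = none
    · rcases ih with ⟨h1, h2⟩ | ⟨L', hm, h1, h2⟩
      · exact Or.inl ⟨by rw [h1]; unfold pvLastStep; rw [if_pos h], by
          intro x hx
          rcases List.mem_append.mp hx with hx | hx
          · exact h2 x hx
          · simp at hx; subst hx; exact h⟩
      · refine Or.inr ⟨L', List.mem_append.mpr (Or.inl hm), ?_, h2⟩
        unfold pvLastStep
        rw [if_pos h]
        exact h1
    · refine Or.inr ⟨L, List.mem_append.mpr (Or.inr (by simp)), ?_, h⟩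
      unfold pvLastStep
      rw [if_neg h]

theorem pvBestB_eq (sequence : List Int) (n L : Int) (hn : n = (sequence.length : Int))
    (hL : 2 ≤ L) :
    pvBestB sequence n L (pvCountsB sequence n L) = pvResFor sequence n L := by
  unfold pvBestB pvResFor pvStepA
  rw [show n - 2 * L + 1 = n - L * 2 + 1 by ring]
  exact (pvFold_eq sequence n L hn hL _ (pvGoodRange n L) _ (Or.inl rfl)).1.symm

-- B's descending scan is the outer fold over the ascending list
theorem pvRev (sequence : List Int) (n : Int) (hn : n = (sequence.length : Int))
    (ls : List Int) (h2 : ∀ L ∈ ls, 2 ≤ L) :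
    ls.foldl (pvLastStep sequence n) ((none : Option (List Int)), (0 : Int)) =
      pvLoopB sequence n ls.reverse := by
  induction ls using List.reverseRecOn with
  | nil => rfl
  | append_singleton ls L ih =>
    rw [List.foldl_append, List.reverse_append]
    simp only [List.foldl_cons, List.foldl_nil, List.reverse_cons, List.reverse_nil,
      List.nil_append, List.singleton_append]
    have hL : 2 ≤ L := h2 L (by simp)
    unfold pvLoopB
    rw [pvBestB_eq sequence n L hn hL]
    rcases hres : pvResFor sequence n L with ⟨o, c⟩
    cases o with
    | some b =>
      unfold pvLastStep
      rw [hres]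
      simp
    | none =>
      unfold pvLastStep
      rw [hres]
      rw [if_pos rfl]
      exact ih (fun x hx => h2 x (List.mem_append.mpr (Or.inl hx)))

-- broken fallback loop keeps its state
theorem pvBrokeStays (sequence : List Int) (pl : Int) (base : List Int) (ls : List Int)
    (m : Int) : ls.foldl (pvRepBodyA sequence pl base) (m, true) = (m, true) := by
  induction ls with
  | nil => rfl
  | cons x ls ih =>
    simp only [List.foldl_cons]
    rw [show pvRepBodyA sequence pl base (m, true) x = (m, true) from rfl]
    exact ih

theorem pvRange_step_two (pl n : Int) (hpl : 0 < pl) (h : 2 * pl ≤ n) :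
    ∃ rest, PySem.List.pyRange 0 (n - pl + 1) pl = 0 :: pl :: rest := by
  rw [PySem.List.pyRange_of_pos _ _ hpl]
  rw [if_pos (by omega : (0 : Int) < n - pl + 1)]
  have hm : 2 ≤ ((n - pl + 1 - 0 + pl - 1) / pl).toNat := by
    have h1 : (2 : Int) ≤ (n - pl + 1 - 0 + pl - 1) / pl := by
      rw [Int.le_ediv_iff_mul_le hpl]
      omega
    omega
  obtain ⟨k, hk⟩ : ∃ k, ((n - pl + 1 - 0 + pl - 1) / pl).toNat = k + 2 :=
    ⟨((n - pl + 1 - 0 + pl - 1) / pl).toNat - 2, by omega⟩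
  rw [hk]
  rw [List.range_succ_eq_map, List.range_succ_eq_map]
  refine ⟨(List.range k).map (fun (j : Nat) => 0 + pl * ((j : Int) + 2)), ?_⟩
  simp only [List.map_cons, List.map_map]
  refine congrArg₂ _ (by norm_num) (congrArg₂ _ (by norm_num) ?_)
  apply List.map_congr_left
  intro j _
  simp only [Function.comp, Nat.succ_eq_add_one]
  push_cast
  ring

-- under no-hit hypotheses the fallback returns (none, 0)
theorem pvFallback_none (sequence : List Int) (n : Int) (hn : n = (sequence.length : Int))
    (ls : List Int) (hprops : ∀ pl ∈ ls, 2 ≤ pl ∧ 2 * pl ≤ n)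
    (hno : ∀ pl ∈ ls, ∀ s ∈ PySem.List.pyRange 0 (n - pl * 2 + 1) 1,
      pvOccA sequence n pl (PySem.List.slice sequence (some s) (some (s + pl))) < 2) :
    pvFallbackA sequence n ls = (none, 0) := by
  induction ls with
  | nil => rfl
  | cons pl ls ih =>
    obtain ⟨hpl2, hpln⟩ := hprops pl (by simp)
    have hocc0 := hno pl (by simp) 0
      (by rw [PySem.List.mem_pyRange_one]; omega)
    rw [zero_add] at hocc0
    have hne : PySem.List.slice sequence (some pl) (some (pl + pl)) ≠
        PySem.List.slice sequence (some 0) (some pl) := by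
      intro he
      rw [pvOccA_eq_countP] at hocc0
      rw [PySem.List.pyRange_one_append 0 pl (n - pl + 1) (by omega) (by omega),
        List.countP_append] at hocc0
      have h1 : 0 < (PySem.List.pyRange 0 pl).countP
          (fun i => decide (pvWin sequence pl i = PySem.List.slice sequence (some 0) (some pl))) := by
        rw [List.countP_pos_iff]
        exact ⟨0, PySem.List.mem_pyRange_one.mpr ⟨le_rfl, by omega⟩,
          by simp [pvWin, zero_add]⟩
      have h2 : 0 < (PySem.List.pyRange pl (n - pl + 1)).countP
          (fun i => decide (pvWin sequence pl i = PySem.List.slice sequence (some 0) (some pl))) := by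
        rw [List.countP_pos_iff]
        exact ⟨pl, PySem.List.mem_pyRange_one.mpr ⟨le_rfl, by omega⟩,
          by simp [pvWin]; exact he⟩
      omega
    obtain ⟨rest, hrange⟩ := pvRange_step_two pl n (by omega) hpln
    have hrep : (pvRepeatsA sequence n pl (PySem.List.slice sequence (some 0) (some pl))).1 = 1 := by
      unfold pvRepeatsA
      rw [hrange]
      simp only [List.foldl_cons]
      rw [show pvRepBodyA sequence pl (PySem.List.slice sequence (some 0) (some pl)) (0, false) 0
          = (1, false) by
        unfold pvRepBodyA
        simp [zero_add]]
      rw [show pvRepBodyA sequence pl (PySem.List.slice sequence (some 0) (some pl)) (1, false) pl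
          = (1, true) by
        have hne' : PySem.List.slice sequence (some pl) (some (pl + pl)) ≠
            PySem.List.slice sequence none (some pl) := by simpa using hne
        unfold pvRepBodyA
        simp [hne']]
      rw [pvBrokeStays]
    unfold pvFallbackA
    simp only [hrep]
    rw [if_neg (by omega)]
    exact ih (fun x hx => hprops x (by simp [hx])) (fun x hx => hno x (by simp [hx]))

-- ===== VERDICT (by name: the statement is the Claim_ definition above) =====
theorem detect_pattern_with_confidence_spec : Claim_equal_detect_pattern_with_confidence := by
  intro sequence _
  unfold Spec_detect_pattern_with_confidence
  unfold detect_pattern_with_confidence detect_pattern_with_confidence_alt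
  dsimp only
  have hn : PySem.List.len sequence = (sequence.length : Int) := PySem.List.len_eq sequence
  set n : Int := PySem.List.len sequence with hdefn
  by_cases hlt : n < 4
  · rw [if_pos (Or.inr hlt), if_pos hlt]
  · have hns : ¬ (sequence = [] ∨ n < 4) := by
      rintro (h | h)
      · exact hlt (by rw [hn, h]; simp)
      · exact hlt h
    rw [if_neg hns, if_neg hlt]
    have hfd : PySem.Int.floordiv n 2 = n / 2 := PySem.Int.floordiv_eq_ediv_of_pos (by norm_num)
    have hn4 : 4 ≤ n := by omega
    set K : Int := min 8 (PySem.Int.floordiv n 2) with hK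
    have hK2 : 2 ≤ K := by rw [hK, hfd]; omega
    have hKn : 2 * K ≤ n := by rw [hK, hfd]; omega
    have hb : min 9 (PySem.Int.floordiv n 2 + 1) = K + 1 := by rw [hK, hfd]; omega
    rw [hb]
    set ls : List Int := PySem.List.pyRange 2 (K + 1) 1 with hls
    have hrevrange : PySem.List.pyRange K 1 (-1) = ls.reverse := by
      rw [hls]
      exact PySem.List.pyRange_neg_one_eq_reverse K 1
    rw [hrevrange]
    have hls2 : ∀ L ∈ ls, 2 ≤ L := fun L hL => (PySem.List.mem_pyRange_one.mp hL).1
    have hlsn : ∀ L ∈ ls, 2 * L ≤ n := by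
      intro L hL
      have h2 := (PySem.List.mem_pyRange_one.mp hL).2
      omega
    have hchain : ls.foldl (pvStepA sequence n) ((none : Option (List Int)), (0 : Int)) =
        ls.foldl (pvLastStep sequence n) ((none : Option (List Int)), (0 : Int)) :=
      pvChain sequence n hn ls hls2
        (by rw [hls]; exact PySem.List.pairwise_lt_pyRange_one 2 (K + 1)) _ (Or.inl rfl)
    have hrev := pvRev sequence n hn ls hls2
    rw [hchain, ← hrev]
    rcases pvLastFold_cases sequence n ls with ⟨hR0, hall⟩ | ⟨L, hmem, hReq, hne⟩
    · rw [hR0]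
      show pvFallbackA sequence n ls = (none, 0)
      apply pvFallback_none sequence n hn ls (fun pl hpl => ⟨hls2 pl hpl, hlsn pl hpl⟩)
      intro pl hpl s hs
      have hres0 : pvResFor sequence n pl = (none, 0) := by
        have h1 := hall pl hpl
        rcases hres : pvResFor sequence n pl with ⟨o, c⟩
        rw [hres] at h1
        cases o with
        | some b => simp at h1
        | none =>
          unfold pvResFor pvStepA at hres
          obtain ⟨heq, _⟩ := pvFoldA_none sequence n pl _ _ (by rw [hres])
          rw [heq] at hres
          rw [← hres]
      unfold pvResFor pvStepA at hres0
      exact (pvFoldA_none sequence n pl _ _ (by rw [hres0])).2 s hs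
    · rw [hReq]
      rcases pvResFor_inv sequence n L hn (hls2 L hmem) with h | ⟨w, m, h, hwl, hm⟩
      · rw [h] at hne; simp at hne
      · have hL2 : 2 ≤ L := hls2 L hmem
        rw [h]
        dsimp only
        rw [if_pos ⟨by intro he; rw [he] at hwl; simp at hwl; omega, hm⟩]
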